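-- pv_equiv track=rewrite | github.com/dayutech/cfr | scan_jar_packages.py | merge_and_minimize_class_rules
-- ===== SOURCE A (Python) =====
-- from typing import Dict, Iterable, List, Sequence, Set, Tuple
--
-- COMMON_DOMAIN_ROOTS = {
--     "org", "com", "net", "io", "edu", "gov",
--     "cn", "uk", "de", "jp", "fr", "ru", "au", "us", "int",
-- }
--
-- def canonical_class_rule(rule: str) -> str:
--     return rule.strip().rstrip(".")
--
-- def class_rule_covers(specific: str, broader: str) -> bool:
--     return specific == broader or specific.startswith(broader + ".")
--
-- def choose_existing_class_text(existing_forms: Sequence[str], canonical: str) -> str: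
--     # 统一格式：class 规则全部使用 trailing '.'，明确包边界匹配语义。
--     return canonical + "."
--
-- def merge_and_minimize_class_rules(existing_rules: Sequence[str], candidates: Dict[str, int]) -> List[str]:
--     existing_by_canonical: Dict[str, List[str]] = {}
--     for rule in existing_rules:
--         c = canonical_class_rule(rule)
--         existing_by_canonical.setdefault(c, []).append(rule)
--
--     merged: Set[str] = set(existing_by_canonical.keys()) | set(candidates.keys())
--
--     selected: List[str] = []
--     for c in sorted(merged, key=lambda x: (x.count("."), -candidates.get(x, 0), x)):
--         segs = c.split(".")
--         if len(segs) == 1 and segs[0].lower() in COMMON_DOMAIN_ROOTS: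
--             continue
--         if any(class_rule_covers(c, b) for b in selected):
--             continue
--         selected.append(c)
--
--     return [
--         choose_existing_class_text(existing_by_canonical.get(c, []), c)
--         for c in sorted(selected)
--     ]
-- ===== SOURCE B (Python) =====
-- COMMON_DOMAIN_ROOTS = {
--     "org", "com", "net", "io", "edu", "gov",
--     "cn", "uk", "de", "jp", "fr", "ru", "au", "us", "int",
-- }
--
-- def merge_and_minimize_class_rules(existing_rules, candidates):
--     merged = {r.strip().rstrip(".") for r in existing_rules} | set(candidates.keys())
--     blocking = {c for c in merged
--                 if "." in c or c.lower() not in COMMON_DOMAIN_ROOTS}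
--     survivors = [c for c in blocking
--                  if not any(b != c and c.startswith(b + ".") for b in blocking)]
--     return [c + "." for c in sorted(survivors)]
-- ===== Notes on version B (the rewrite author's own statement) =====
-- stated objective: simpler
-- what changed: Replaces the depth-sorted greedy cover-scan with a growing selected list by a direct characterisation: build the blocking set (merged canonicals minus skipped domain roots) once and keep exactly the rules no other blocking rule dot-prefixes; the sort key over candidate counts disappears entirely.
import Mathlib
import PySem

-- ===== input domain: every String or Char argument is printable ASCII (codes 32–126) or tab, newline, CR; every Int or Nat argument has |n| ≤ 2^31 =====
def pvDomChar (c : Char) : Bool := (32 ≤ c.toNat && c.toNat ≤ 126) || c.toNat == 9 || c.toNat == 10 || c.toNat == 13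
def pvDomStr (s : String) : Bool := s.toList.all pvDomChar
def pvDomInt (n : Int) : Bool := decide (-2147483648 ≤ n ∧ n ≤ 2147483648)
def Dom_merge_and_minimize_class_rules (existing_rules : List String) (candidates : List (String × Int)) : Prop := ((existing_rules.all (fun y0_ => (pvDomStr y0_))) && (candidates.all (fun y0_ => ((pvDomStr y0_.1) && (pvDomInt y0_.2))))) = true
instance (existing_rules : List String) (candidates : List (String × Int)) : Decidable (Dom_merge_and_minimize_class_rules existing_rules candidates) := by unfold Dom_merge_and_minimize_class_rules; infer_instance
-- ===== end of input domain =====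

-- ===== PORT A =====
-- B replaces A's depth-sorted greedy cover-scan by a direct prefix-blocking characterisation (alternative decomposition, same asymptotics).
def COMMON_DOMAIN_ROOTS : PySem.Set String :=
  PySem.Set.ofList ["org","com","net","io","edu","gov","cn","uk","de","jp","fr","ru","au","us","int"]

-- rule.strip().rstrip("."): rstrip(".") drops trailing '.' characters — hand-ported (exact)
def canonical_class_rule (rule : String) : String :=
  String.ofList (((PySem.Chars.strip rule.toList).reverse.dropWhile (fun ch => ch == '.')).reverse)

def class_rule_covers (specific : String) (broader : String) : Bool :=
  specific == broader || PySem.Chars.startswith specific.toList (broader.toList ++ ['.'])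

def choose_existing_class_text (_existing_forms : List String) (canonical : String) : String :=
  String.ofList (canonical.toList ++ ['.'])

def merge_and_minimize_class_rules (existing_rules : List String) (candidates : List (String × Int)) : List String :=
  let cand : PySem.Dict String Int := PySem.Dict.ofList candidates
  let existing_by_canonical : PySem.Dict String (List String) :=
    existing_rules.foldl (fun d rule =>
      let c := canonical_class_rule rule
      d.insert c (d.getD c [] ++ [rule])) PySem.Dict.empty
  let merged : PySem.Set String :=
    PySem.Set.union (PySem.Set.ofList existing_by_canonical.keys) (PySem.Set.ofList cand.keys)
  -- Python's single sorted() with tuple key (x.count("."), -candidates.get(x, 0), x),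
  -- ported as stable sorts: by the third component, then sorted2 on the first two
  let ordered : List String :=
    PySem.List.sorted2 (PySem.List.sorted merged (fun x => x))
      (fun x => PySem.Str.count x ".") (fun x => -(cand.getD x 0))
  let selected : List String :=
    ordered.foldl (fun sel c =>
      let segs := PySem.Chars.splitOn c.toList ['.']
      -- segs is never empty, so segs.headD [] is exactly Python's segs[0]
      if segs.length == 1 && COMMON_DOMAIN_ROOTS.contains (String.ofList (PySem.Chars.lower (segs.headD [])))
      then sel
      else if sel.any (fun b => class_rule_covers c b) then sel
      else sel ++ [c]) []
  (PySem.List.sorted selected (fun x => x)).map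
    (fun c => choose_existing_class_text (existing_by_canonical.getD c []) c)

-- ===== PORT B =====
def merge_and_minimize_class_rules_alt (existing_rules : List String) (candidates : List (String × Int)) : List String :=
  let cand : PySem.Dict String Int := PySem.Dict.ofList candidates
  let merged : PySem.Set String :=
    PySem.Set.union
      (PySem.Set.ofList (existing_rules.map (fun r =>
        String.ofList (((PySem.Chars.strip r.toList).reverse.dropWhile (fun ch => ch == '.')).reverse))))
      (PySem.Set.ofList cand.keys)
  let blocking : PySem.Set String :=
    merged.filter (fun c =>
      PySem.Chars.isIn ['.'] c.toList ||
      !(COMMON_DOMAIN_ROOTS.contains (String.ofList (PySem.Chars.lower c.toList))))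
  let survivors : List String :=
    blocking.filter (fun c =>
      !(blocking.any (fun b => b != c && PySem.Chars.startswith c.toList (b.toList ++ ['.']))))
  (PySem.List.sorted survivors (fun x => x)).map (fun c => String.ofList (c.toList ++ ['.']))
-- ===== PRECONDITION & SPEC =====
def Spec_merge_and_minimize_class_rules (existing_rules : List String) (candidates : List (String × Int)) (out : List String) : Prop := out = merge_and_minimize_class_rules_alt existing_rules candidates
instance (existing_rules : List String) (candidates : List (String × Int)) (out : List String) : Decidable (Spec_merge_and_minimize_class_rules existing_rules candidates out) := by unfold Spec_merge_and_minimize_class_rules; infer_instance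

-- ===== CLAIM (what is proved, stated in full; the proofs are below) =====
def Claim_equal_merge_and_minimize_class_rules : Prop := ∀ (existing_rules : List String) (candidates : List (String × Int)), Dom_merge_and_minimize_class_rules existing_rules candidates → Spec_merge_and_minimize_class_rules existing_rules candidates (merge_and_minimize_class_rules existing_rules candidates)

-- ===== LEMMAS AND PROOFS =====
-- proof-side predicates
def pvNotRoot (c : String) : Bool :=
  PySem.Chars.isIn ['.'] c.toList ||
  !(COMMON_DOMAIN_ROOTS.contains (String.ofList (PySem.Chars.lower c.toList)))

def pvCov (c b : String) : Bool := PySem.Chars.startswith c.toList (b.toList ++ ['.'])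

def pvGood (M : List String) (c : String) : Bool :=
  pvNotRoot c &&
  !(M.any (fun b => pvNotRoot b && b != c && PySem.Chars.startswith c.toList (b.toList ++ ['.'])))

lemma go_no_dot : ∀ (fuel : Nat) (l cur : List Char) (acc : List (List Char)), '.' ∉ l →
    PySem.Chars.splitOn.go ['.'] fuel l cur acc = ((cur.reverse ++ l) :: acc).reverse := by
  intro fuel
  induction fuel with
  | zero => intro l cur acc h; simp [PySem.Chars.splitOn.go]
  | succ n ih =>
    intro l cur acc h
    cases l with
    | nil => simp [PySem.Chars.splitOn.go]
    | cons c rest =>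
      have hc : c ≠ '.' := fun hh => h (hh ▸ List.mem_cons_self)
      have hp : (['.'] : List Char).isPrefixOf (c :: rest) = false := by
        simp [List.isPrefixOf]; exact fun hh => absurd hh.symm hc
      rw [PySem.Chars.splitOn.go]
      simp only [hp, Bool.false_eq_true, if_false]
      rw [ih rest (c :: cur) acc (fun hm => h (List.mem_cons_of_mem _ hm))]
      simp

lemma go_len : ∀ (fuel : Nat) (l cur : List Char) (acc : List (List Char)),
    acc.length + 1 ≤ (PySem.Chars.splitOn.go ['.'] fuel l cur acc).length := by
  intro fuel
  induction fuel with
  | zero => intro l cur acc; simp [PySem.Chars.splitOn.go]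
  | succ n ih =>
    intro l cur acc
    cases l with
    | nil => simp [PySem.Chars.splitOn.go]
    | cons c rest =>
      rw [PySem.Chars.splitOn.go]
      by_cases hp : (['.'] : List Char).isPrefixOf (c :: rest) = true
      · simp only [hp, if_true]
        calc acc.length + 1 ≤ (cur.reverse :: acc).length + 1 := by simp
          _ ≤ _ := ih _ [] _
      · simp only [Bool.not_eq_true] at hp
        simp only [hp, Bool.false_eq_true, if_false]
        exact ih _ _ _

lemma go_dot : ∀ (fuel : Nat) (l cur : List Char) (acc : List (List Char)), l.length < fuel → '.' ∈ l →
    acc.length + 2 ≤ (PySem.Chars.splitOn.go ['.'] fuel l cur acc).length := by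
  intro fuel
  induction fuel with
  | zero => intro l cur acc hf; omega
  | succ n ih =>
    intro l cur acc hf hm
    cases l with
    | nil => simp at hm
    | cons c rest =>
      rw [PySem.Chars.splitOn.go]
      by_cases hp : (['.'] : List Char).isPrefixOf (c :: rest) = true
      · simp only [hp, if_true]
        have := go_len n (List.drop 1 (c :: rest)) [] (cur.reverse :: acc)
        simpa using this
      · have hc : ¬ ('.' = c) := by
          intro hh; apply absurd hp; simp only [Bool.not_eq_true]
          simp [List.isPrefixOf]; exact hh
        simp only [Bool.not_eq_true] at hp
        simp only [hp, Bool.false_eq_true, if_false]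
        apply ih _ _ _ (by simp at hf ⊢; omega)
        cases hm with
        | head => exact absurd rfl hc
        | tail _ h => exact h

lemma count_go : ∀ (fuel : Nat) (l : List Char) (acc : Nat), l.length ≤ fuel →
    PySem.Chars.count.go ['.'] fuel l acc = acc + l.count '.' := by
  intro fuel
  induction fuel with
  | zero => intro l acc hf; rw [List.length_eq_zero_iff.mp (Nat.le_zero.mp hf)]; simp [PySem.Chars.count.go]
  | succ n ih =>
    intro l acc hf
    cases l with
    | nil => simp [PySem.Chars.count.go]
    | cons c rest =>
      rw [PySem.Chars.count.go]
      by_cases hp : (['.'] : List Char).isPrefixOf (c :: rest) = true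
      · have hc : '.' = c := by simpa [List.isPrefixOf] using hp
        simp only [hp, if_true]
        rw [ih _ _ (by simp at hf ⊢; omega)]
        simp [← hc]
        omega
      · have hc : ¬('.' = c) := by intro hh; apply absurd hp; simp [List.isPrefixOf]; exact hh
        simp only [Bool.not_eq_true] at hp
        simp only [hp, Bool.false_eq_true, if_false]
        rw [ih _ _ (by simp at hf ⊢; omega)]
        simp [List.count_cons]
        intro hh; exact absurd (by simpa using hh.symm) hc

lemma chars_count_dot (l : List Char) : PySem.Chars.count l ['.'] = l.count '.' := by
  rw [show PySem.Chars.count l ['.'] = PySem.Chars.count.go ['.'] l.length l 0 from by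
    unfold PySem.Chars.count; rw [if_neg (by simp)]]
  rw [count_go _ _ _ le_rfl]
  simp

lemma rootTest_eq (c : String) :
    ((PySem.Chars.splitOn c.toList ['.']).length == 1 &&
      COMMON_DOMAIN_ROOTS.contains
        (String.ofList (PySem.Chars.lower ((PySem.Chars.splitOn c.toList ['.']).headD [])))) =
      !pvNotRoot c := by
  by_cases hdot : '.' ∈ c.toList
  · have h2 : 2 ≤ (PySem.Chars.splitOn c.toList ['.']).length := by
      have := go_dot (c.toList.length + 1) c.toList [] [] (by omega) hdot
      simpa [PySem.Chars.splitOn] using this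
    have hne : ((PySem.Chars.splitOn c.toList ['.']).length == 1) = false := by
      simp; omega
    have hin : PySem.Chars.isIn ['.'] c.toList = true := by
      rw [PySem.Chars.isIn_iff_infix, List.singleton_infix_iff]; exact hdot
    simp [hne, pvNotRoot, hin]
  · have hs : PySem.Chars.splitOn c.toList ['.'] = [c.toList] := by
      unfold PySem.Chars.splitOn
      rw [go_no_dot _ _ _ _ hdot]
      simp
    have hin : PySem.Chars.isIn ['.'] c.toList = false := by
      rw [← Bool.not_eq_true, PySem.Chars.isIn_iff_infix, List.singleton_infix_iff]; exact hdot
    simp [hs, pvNotRoot, hin]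

lemma cov_count {c b : String} (h : pvCov c b = true) :
    b.toList.count '.' < c.toList.count '.' := by
  have hpre : (b.toList ++ ['.']) <+: c.toList := (PySem.Chars.startswith_iff _ _).mp h
  have := hpre.sublist.count_le '.'
  simpa using this

lemma cov_trans {c p b : String} (h1 : pvCov p b = true) (h2 : pvCov c p = true) : pvCov c b = true := by
  rw [pvCov, PySem.Chars.startswith_iff] at *
  exact h1.trans ((p.toList.prefix_append ['.']).trans h2)

lemma insertBy_pairwise {α : Type} (before : α → α → Bool)
    (htr : ∀ a b c, before a b = true → before b c = true → before a c = true)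
    (hasym : ∀ a b, before a b = true → before b a = false) :
    ∀ (x : α) (acc : List α), acc.Pairwise (fun a b => before b a = false) →
      (PySem.List.insertBy before x acc).Pairwise (fun a b => before b a = false) := by
  intro x acc
  induction acc with
  | nil => intro _; simp [PySem.List.insertBy]
  | cons y ys ih =>
    intro hpw
    rw [PySem.List.insertBy]
    rcases List.pairwise_cons.mp hpw with ⟨hy, hys⟩
    by_cases hxy : before x y = true
    · simp only [hxy, if_true]
      refine List.pairwise_cons.mpr ⟨?_, hpw⟩
      intro z hz
      cases hz with
      | head => exact hasym _ _ hxy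
      | tail _ hz =>
        by_cases hzx : before z x = true
        · have := htr _ _ _ hzx hxy
          rw [hy z hz] at this; exact absurd this (by simp)
        · simpa using hzx
    · simp only [hxy, Bool.false_eq_true, if_false]
      refine List.pairwise_cons.mpr ⟨?_, ih hys⟩
      intro z hz
      rcases (PySem.List.mem_insertBy _ _ _ _).mp hz with rfl | hz
      · simpa using hxy
      · exact hy z hz

lemma foldl_insertBy_pairwise {α : Type} (before : α → α → Bool)
    (htr : ∀ a b c, before a b = true → before b c = true → before a c = true)
    (hasym : ∀ a b, before a b = true → before b a = false) :
    ∀ (xs acc : List α), acc.Pairwise (fun a b => before b a = false) →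
      (xs.foldl (fun acc x => PySem.List.insertBy before x acc) acc).Pairwise
        (fun a b => before b a = false) := by
  intro xs
  induction xs with
  | nil => intro acc h; simpa
  | cons x xs ih =>
    intro acc h
    exact ih _ (insertBy_pairwise before htr hasym x acc h)

lemma sorted2_cnt_pairwise (xs : List String) (k2 : String → Int) :
    (PySem.List.sorted2 xs (fun x => PySem.Str.count x ".") k2).Pairwise
      (fun a b => a.toList.count '.' ≤ b.toList.count '.') := by
  unfold PySem.List.sorted2
  have hpw := foldl_insertBy_pairwise
    (fun a b => decide (PySem.Str.count a "." < PySem.Str.count b ".") ||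
      (!decide (PySem.Str.count b "." < PySem.Str.count a ".") && decide (k2 a < k2 b)))
    (by intro a b c hab hbc; simp at hab hbc ⊢; omega)
    (by intro a b hab; simp at hab ⊢; omega)
    xs [] (by simp)
  refine List.Pairwise.imp ?_ hpw
  intro a b h
  simp [chars_count_dot] at h
  omega

lemma not_good_elim {M : List String} {b : String} (hbR : pvNotRoot b = true)
    (hg : ¬ pvGood M b = true) :
    ∃ b' ∈ M, pvNotRoot b' = true ∧ b' ≠ b ∧ pvCov b b' = true := by
  cases hany : M.any (fun b' => pvNotRoot b' && b' != b && PySem.Chars.startswith b.toList (b'.toList ++ ['.'])) with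
  | false => exact absurd (by simp [pvGood, hbR, hany]) hg
  | true =>
    rw [List.any_eq_true] at hany
    rcases hany with ⟨b', hb'M, hb'⟩
    simp only [Bool.and_eq_true, bne_iff_ne] at hb'
    exact ⟨b', hb'M, hb'.1.1, hb'.1.2, hb'.2⟩

lemma greedy_closure (M done : List String) (c : String)
    (hdone : ∀ x ∈ M, pvNotRoot x = true → x.toList.count '.' < c.toList.count '.' → x ∈ done) :
    ∀ (n : Nat) (b : String), b.toList.count '.' ≤ n → b ∈ M → pvNotRoot b = true →
      pvCov c b = true →
      ∃ s ∈ done.filter (pvGood M), pvCov c s = true := by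
  intro n
  induction n with
  | zero =>
    intro b hn hbM hbR hcov
    by_cases hg : pvGood M b = true
    · exact ⟨b, List.mem_filter.mpr ⟨hdone b hbM hbR (cov_count hcov), hg⟩, hcov⟩
    · rcases not_good_elim hbR hg with ⟨b', _, _, _, hb'cov⟩
      have := cov_count hb'cov
      omega
  | succ n ih =>
    intro b hn hbM hbR hcov
    by_cases hg : pvGood M b = true
    · exact ⟨b, List.mem_filter.mpr ⟨hdone b hbM hbR (cov_count hcov), hg⟩, hcov⟩
    · rcases not_good_elim hbR hg with ⟨b', hb'M, hb'R, _, hb'cov⟩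
      have hlt := cov_count hb'cov
      exact ih b' (by omega) hb'M hb'R (cov_trans hb'cov hcov)

lemma greedy_loop (M : List String) :
    ∀ (rest done : List String), (done ++ rest).Nodup →
      (∀ x ∈ M, x ∈ done ++ rest) → (∀ x ∈ done ++ rest, x ∈ M) →
      (done ++ rest).Pairwise (fun a b => a.toList.count '.' ≤ b.toList.count '.') →
      rest.foldl (fun sel c =>
        if ((PySem.Chars.splitOn c.toList ['.']).length == 1 &&
            COMMON_DOMAIN_ROOTS.contains
              (String.ofList (PySem.Chars.lower ((PySem.Chars.splitOn c.toList ['.']).headD []))))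
        then sel
        else if sel.any (fun b => class_rule_covers c b) then sel
        else sel ++ [c]) (done.filter (pvGood M)) = (done ++ rest).filter (pvGood M) := by
  intro rest
  induction rest with
  | nil => intro done _ _ _ _; simp
  | cons c rest' ih =>
    intro done hnd hMin hinM hpw
    rw [List.foldl_cons]
    have hstep : (if ((PySem.Chars.splitOn c.toList ['.']).length == 1 &&
          COMMON_DOMAIN_ROOTS.contains (String.ofList (PySem.Chars.lower ((PySem.Chars.splitOn c.toList ['.']).headD []))))
        then done.filter (pvGood M)
        else if (done.filter (pvGood M)).any (fun b => class_rule_covers c b) then done.filter (pvGood M)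
        else done.filter (pvGood M) ++ [c]) = (done ++ [c]).filter (pvGood M) := by
      rw [rootTest_eq]
      have hcdone : c ∉ done := by
        intro hc
        exact List.disjoint_of_nodup_append hnd hc List.mem_cons_self
      by_cases hR : pvNotRoot c = true
      · rw [hR]
        simp only [Bool.not_true, Bool.false_eq_true, if_false]
        have hany : (done.filter (pvGood M)).any (fun b => class_rule_covers c b) = (!pvGood M c) := by
          by_cases hg : pvGood M c = true
          · rw [hg]
            simp only [Bool.not_true]
            rw [List.any_eq_false]
            intro s hs
            rcases List.mem_filter.mp hs with ⟨hsdone, hsgood⟩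
            unfold class_rule_covers
            simp only [Bool.or_eq_true, not_or, Bool.not_eq_true]
            constructor
            · simp only [beq_eq_false_iff_ne, ne_eq]
              intro hh; exact hcdone (hh ▸ hsdone)
            · -- if it covered, pvGood M c would be false
              by_contra hsw
              simp only [Bool.not_eq_false] at hsw
              unfold pvGood at hg
              simp only [hR, Bool.true_and, Bool.not_eq_true', List.any_eq_false] at hg
              have := hg s (hinM s (List.mem_append.mpr (Or.inl hsdone)))
              have hsR : pvNotRoot s = true := by
                revert hsgood; unfold pvGood; cases pvNotRoot s <;> simp
              have hsne : (s != c) = true := by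
                simp only [bne_iff_ne, ne_eq]
                intro hh; exact hcdone (hh ▸ hsdone)
              rw [hsR, hsne, hsw] at this
              simp at this
          · simp only [Bool.not_eq_true] at hg
            rw [hg]
            simp only [Bool.not_false]
            rcases not_good_elim (M := M) hR (by simp [hg]) with ⟨b, hbM, hbR, hbne, hbcov⟩
            have hdone : ∀ x ∈ M, pvNotRoot x = true → x.toList.count '.' < c.toList.count '.' → x ∈ done := by
              intro x hxM hxR hxlt
              rcases List.mem_append.mp (hMin x hxM) with hx | hx
              · exact hx
              · exfalso
                rcases List.pairwise_append.mp hpw with ⟨_, _, hcross⟩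
                cases hx with
                | head => omega
                | tail _ hx =>
                  have : c.toList.count '.' ≤ x.toList.count '.' := by
                    have hpc := (List.pairwise_cons.mp (List.pairwise_append.mp hpw).2.1).1
                    exact hpc x hx
                  omega
            rcases greedy_closure M done c hdone (b.toList.count '.') b le_rfl hbM hbR hbcov with ⟨s, hs, hscov⟩
            rw [List.any_eq_true]
            refine ⟨s, hs, ?_⟩
            unfold class_rule_covers
            simp only [pvCov] at hscov
            rw [hscov]
            simp
        rw [hany]
        by_cases hg : pvGood M c = true
        · rw [hg]; simp [List.filter_append, hg]
        · simp only [Bool.not_eq_true] at hg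
          rw [hg]; simp [List.filter_append, hg]
      · simp only [Bool.not_eq_true] at hR
        rw [hR]
        simp only [Bool.not_false, if_true]
        have hg : pvGood M c = false := by unfold pvGood; rw [hR]; simp
        simp [List.filter_append, hg]
    rw [hstep]
    have := ih (done ++ [c])
    rw [List.append_assoc] at this
    simp only [List.singleton_append] at this
    exact this hnd hMin hinM hpw


lemma keysA (ex : List String) :
    (ex.foldl (fun d rule =>
        let c := canonical_class_rule rule
        d.insert c (d.getD c [] ++ [rule])) (PySem.Dict.empty : PySem.Dict String (List String))).keys
      = PySem.Set.ofList (ex.map (fun r =>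
          String.ofList (((PySem.Chars.strip r.toList).reverse.dropWhile (fun ch => ch == '.')).reverse))) := by
  rw [show (fun (d : PySem.Dict String (List String)) rule =>
      let c := canonical_class_rule rule
      d.insert c (d.getD c [] ++ [rule]))
    = (fun (d : PySem.Dict String (List String)) rule =>
        d.insert (canonical_class_rule rule) (d.getD (canonical_class_rule rule) [] ++ [rule])) from rfl]
  rw [PySem.Dict.keys_foldl_insert_key]
  rfl

lemma B_surv (M : List String) :
    (M.filter (fun c =>
      PySem.Chars.isIn ['.'] c.toList ||
      !(COMMON_DOMAIN_ROOTS.contains (String.ofList (PySem.Chars.lower c.toList))))).filter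
      (fun c =>
        !((M.filter (fun c =>
            PySem.Chars.isIn ['.'] c.toList ||
            !(COMMON_DOMAIN_ROOTS.contains (String.ofList (PySem.Chars.lower c.toList))))).any
          (fun b => b != c && PySem.Chars.startswith c.toList (b.toList ++ ['.']))))
      = M.filter (pvGood M) := by
  rw [List.filter_filter]
  apply List.filter_congr
  intro x _
  rw [List.any_filter]
  unfold pvGood pvNotRoot
  simp [Bool.and_assoc]
  rw [Bool.and_comm]


-- ===== VERDICT (by name: the statement is the Claim_ definition above) =====
theorem merge_and_minimize_class_rules_spec : Claim_equal_merge_and_minimize_class_rules := by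
  unfold Claim_equal_merge_and_minimize_class_rules
  intro ex cand _hdom
  unfold Spec_merge_and_minimize_class_rules
  simp only [merge_and_minimize_class_rules, merge_and_minimize_class_rules_alt]
  rw [keysA, PySem.Set.ofList_ofList]
  rw [B_surv]
  set M : List String := (PySem.Set.ofList (ex.map (fun r =>
      String.ofList (((PySem.Chars.strip r.toList).reverse.dropWhile (fun ch => ch == '.')).reverse)))).union
      (PySem.Set.ofList (PySem.Dict.ofList cand).keys) with hM
  set L : List String := PySem.List.sorted2 (PySem.List.sorted M (fun x => x))
      (fun x => PySem.Str.count x ".") (fun x => -(PySem.Dict.ofList cand).getD x 0) with hL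
  have hndM : M.Nodup := PySem.Set.nodup_update _ _ (PySem.Set.nodup_ofList _)
  have hperm : L.Perm M := (PySem.List.sorted2_perm _ _ _ _).trans (PySem.List.sorted_perm _ _ _)
  have hfold := greedy_loop M L [] (by simpa using hperm.nodup_iff.mpr hndM)
    (by intro x hx; simpa using hperm.mem_iff.mpr hx)
    (by intro x hx; exact hperm.mem_iff.mp (by simpa using hx))
    (by simpa using sorted2_cnt_pairwise (PySem.List.sorted M (fun x => x)) (fun x => -(PySem.Dict.ofList cand).getD x 0))
  simp only [List.filter_nil, List.nil_append] at hfold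
  rw [hfold]
  rw [PySem.List.sorted_eq_sorted_of_perm _ _ (fun x => x) (fun a b h => h) (hperm.filter _)]
  simp [choose_existing_class_text]
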